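-- pv_equiv track=rewrite | github.com/MargoAndrianova/Algorytmy | HW_13/HW_13_18_1394.py | extr
-- ===== SOURCE A (Python) =====
-- def extr(input_str):
--     expression = []
--     i = 0
--     while i < len(input_str):
--         if input_str[i] in " \t\n":
--             i += 1
--             continue
--         if input_str[i].isdigit():
--             j = i
--             while j < len(input_str) and input_str[j].isdigit():
--                 j += 1
--             expression.append(input_str[i:j])
--             i = j
--         elif input_str[i] == '(':
--             cnt = 0
--             j = i
--             while j < len(input_str):
--                 if input_str[j] == '(':
--                     cnt += 1
--                 elif input_str[j] == ')':
--                     cnt -= 1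
--                 j += 1
--                 if cnt == 0:
--                     break
--             expression.append(input_str[i:j])
--             i = j
--         else:
--             i += 1
--     return expression
-- ===== SOURCE B (Python) =====
-- def extr(input_str):
--     out = []
--     buf = []
--     depth = 0
--     for ch in input_str:
--         if depth != 0:
--             buf.append(ch)
--             if ch == '(':
--                 depth += 1
--             elif ch == ')':
--                 if depth == 1:
--                     out.append(''.join(buf))
--                     buf = []
--                     depth = 0
--                 else:
--                     depth -= 1
--         elif ch.isdigit():
--             buf.append(ch)
--         else:
--             if buf:
--                 out.append(''.join(buf))
--                 buf = []
--             if ch == '(':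
--                 buf = [ch]
--                 depth = 1
--     return out + ([''.join(buf)] if buf else [])
-- ===== Notes on version B (the rewrite author's own statement) =====
-- stated objective: simpler
-- what changed: Replaced A's nested index-jumping while-loops with slicing by a single flat left-fold over the characters that carries a current-token buffer and a paren-depth counter, flushing tokens as they close and once at the end.
import Mathlib
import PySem

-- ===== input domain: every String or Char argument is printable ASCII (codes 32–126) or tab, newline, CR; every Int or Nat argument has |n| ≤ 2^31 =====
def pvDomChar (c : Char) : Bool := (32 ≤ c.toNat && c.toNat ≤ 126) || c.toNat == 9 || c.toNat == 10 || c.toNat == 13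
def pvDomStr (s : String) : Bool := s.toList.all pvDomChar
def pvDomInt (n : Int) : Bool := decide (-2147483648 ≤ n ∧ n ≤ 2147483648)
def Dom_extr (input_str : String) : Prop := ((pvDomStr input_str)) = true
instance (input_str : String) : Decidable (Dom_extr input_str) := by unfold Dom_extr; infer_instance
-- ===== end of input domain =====

-- B replaces A's nested index-jumping scans (with slicing) by a single flat fold over the
-- characters carrying a token buffer and a paren-depth counter; objective: simpler one-pass
-- decomposition, same asymptotic cost.

-- ===== PORT A =====
-- inner while of the digit branch: advance j while it points at a digit; fuel (≥ remaining
-- length at every call site) only makes the recursion structural, it never changes the value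
-- (Char.isDigit is exact for Python's str.isdigit on the ASCII domain)
def digEnd (s : List Char) (fuel j : Nat) : Nat :=
  match fuel with
  | 0 => j
  | f + 1 => if j < s.length ∧ (s.getD j ' ').isDigit then digEnd s f (j + 1) else j

-- inner while of the '(' branch: advance j, counting parens, stop after cnt hits 0
def parEnd (s : List Char) (fuel j : Nat) (cnt : Int) : Nat :=
  match fuel with
  | 0 => j
  | f + 1 =>
    if j < s.length then
      let cnt' : Int :=
        if s.getD j ' ' = '(' then cnt + 1
        else if s.getD j ' ' = ')' then cnt - 1 else cnt
      if cnt' = 0 then j + 1 else parEnd s f (j + 1) cnt'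
    else j

-- outer while loop of A; slices input_str[i:j] with 0 ≤ i ≤ j are exactly (drop i).take (j-i)
def extrLoop (s : List Char) (fuel i : Nat) (expression : List String) : List String :=
  match fuel with
  | 0 => expression
  | f + 1 =>
    if i < s.length then
      if s.getD i ' ' = ' ' ∨ s.getD i ' ' = '\t' ∨ s.getD i ' ' = '\n' then
        extrLoop s f (i + 1) expression
      else if (s.getD i ' ').isDigit then
        extrLoop s f (digEnd s s.length i)
          (expression ++ [String.ofList ((s.drop i).take (digEnd s s.length i - i))])
      else if s.getD i ' ' = '(' then
        extrLoop s f (parEnd s s.length i 0)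
          (expression ++ [String.ofList ((s.drop i).take (parEnd s s.length i 0 - i))])
      else extrLoop s f (i + 1) expression
    else expression

def extr (input_str : String) : List String :=
  extrLoop input_str.toList input_str.toList.length 0 []

-- ===== PORT B =====
-- one step of B's flat loop: state = (finished tokens, current buffer, paren depth)
def extrAltStep : List String × List Char × Nat → Char → List String × List Char × Nat
  | (out, buf, d), ch =>
    if d ≠ 0 then
      let buf' := buf ++ [ch]
      if ch = '(' then (out, buf', d + 1)
      else if ch = ')' then
        (if d = 1 then (out ++ [String.ofList buf'], [], 0) else (out, buf', d - 1))
      else (out, buf', d)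
    else if ch.isDigit then (out, buf ++ [ch], 0)
    else
      let out' := if buf = [] then out else out ++ [String.ofList buf]
      if ch = '(' then (out', [ch], 1) else (out', [], 0)

def extr_alt (input_str : String) : List String :=
  let st := input_str.toList.foldl extrAltStep ([], [], 0)
  if st.2.1 = [] then st.1 else st.1 ++ [String.ofList st.2.1]

-- ===== PRECONDITION & SPEC =====
def Spec_extr (input_str : String) (out : List String) : Prop := out = extr_alt input_str
instance (input_str : String) (out : List String) : Decidable (Spec_extr input_str out) := by unfold Spec_extr; infer_instance

-- ===== CLAIM (what is proved, stated in full; the proofs are below) =====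
def Claim_equal_extr : Prop := ∀ (input_str : String), Dom_extr input_str → Spec_extr input_str (extr input_str)

-- ===== LEMMAS AND PROOFS =====

def flushAcc (acc : List String) (buf : List Char) : List String :=
  if buf = [] then acc else acc ++ [String.ofList buf]

def finishSt (st : List String × List Char × Nat) : List String := flushAcc st.1 st.2.1

theorem flushAcc_nil (acc : List String) : flushAcc acc [] = acc := rfl

theorem flushAcc_ne (acc : List String) (buf : List Char) (h : buf ≠ []) :
    flushAcc acc buf = acc ++ [String.ofList buf] := by simp [flushAcc, h]

theorem le_digEnd (s : List Char) : ∀ (f j : Nat), j ≤ digEnd s f j := by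
  intro f
  induction f with
  | zero => intro j; exact le_refl j
  | succ f ih =>
    intro j
    rw [digEnd]
    split
    · exact le_trans (by omega) (ih (j + 1))
    · exact le_refl j

theorem digEnd_le_length (s : List Char) : ∀ (f j : Nat), j ≤ s.length → digEnd s f j ≤ s.length := by
  intro f
  induction f with
  | zero => intro j h; exact h
  | succ f ih =>
    intro j h
    rw [digEnd]
    split
    case isTrue hc => exact ih (j + 1) (by omega)
    case isFalse => exact h

theorem digEnd_fuel (s : List Char) : ∀ (f1 f2 j : Nat), s.length - j ≤ f1 → s.length - j ≤ f2 →
    digEnd s f1 j = digEnd s f2 j := by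
  intro f1
  induction f1 with
  | zero =>
    intro f2 j h1 h2
    cases f2 with
    | zero => rfl
    | succ f2 =>
      rw [digEnd, digEnd, if_neg (by omega)]
  | succ f1 ih =>
    intro f2 j h1 h2
    cases f2 with
    | zero =>
      rw [digEnd, digEnd, if_neg (by omega)]
    | succ f2 =>
      rw [digEnd, digEnd]
      split
      case isTrue hc => exact ih f2 (j + 1) (by omega) (by omega)
      case isFalse => rfl

theorem digEnd_step (s : List Char) (j : Nat) (hj : j < s.length) (hd : (s.getD j ' ').isDigit) :
    digEnd s s.length j = digEnd s s.length (j + 1) := by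
  obtain ⟨f, hf⟩ : ∃ f, s.length = f + 1 := ⟨s.length - 1, by omega⟩
  conv_lhs => rw [hf]
  rw [digEnd, if_pos ⟨hj, hd⟩]
  exact digEnd_fuel s f s.length (j + 1) (by omega) (by omega)

theorem lt_digEnd (s : List Char) (j : Nat) (hj : j < s.length) (hd : (s.getD j ' ').isDigit) :
    j < digEnd s s.length j := by
  rw [digEnd_step s j hj hd]
  exact lt_of_lt_of_le (by omega) (le_digEnd s s.length (j + 1))

theorem digEnd_not_digit (s : List Char) : ∀ (f j : Nat), s.length - j ≤ f →
    digEnd s f j < s.length → ¬ (s.getD (digEnd s f j) ' ').isDigit := by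
  intro f
  induction f with
  | zero =>
    intro j hf hl
    exact absurd hl (by simp [digEnd]; omega)
  | succ f ih =>
    intro j hf
    rw [digEnd]
    split
    case isTrue hc => exact ih (j + 1) (by omega)
    case isFalse hc =>
      intro hl hd
      exact hc ⟨hl, hd⟩

theorem le_parEnd (s : List Char) : ∀ (f j : Nat) (cnt : Int), j ≤ parEnd s f j cnt := by
  intro f
  induction f with
  | zero => intro j cnt; exact le_refl j
  | succ f ih =>
    intro j cnt
    rw [parEnd]
    split
    · dsimp only
      generalize (if s.getD j ' ' = '(' then cnt + 1 else if s.getD j ' ' = ')' then cnt - 1 else cnt) = c'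
      by_cases h0 : c' = 0
      · rw [if_pos h0]; omega
      · rw [if_neg h0]; exact le_trans (by omega) (ih (j + 1) c')
    · exact le_refl j

theorem parEnd_fuel (s : List Char) : ∀ (f1 f2 j : Nat) (cnt : Int), s.length - j ≤ f1 →
    s.length - j ≤ f2 → parEnd s f1 j cnt = parEnd s f2 j cnt := by
  intro f1
  induction f1 with
  | zero =>
    intro f2 j cnt h1 h2
    cases f2 with
    | zero => rfl
    | succ f2 => rw [parEnd, parEnd, if_neg (by omega)]
  | succ f1 ih =>
    intro f2 j cnt h1 h2
    cases f2 with
    | zero => rw [parEnd, parEnd, if_neg (by omega)]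
    | succ f2 =>
      rw [parEnd, parEnd]
      split
      case isTrue hc =>
        dsimp only
        generalize (if s.getD j ' ' = '(' then cnt + 1 else if s.getD j ' ' = ')' then cnt - 1 else cnt) = c'
        by_cases h0 : c' = 0
        · rw [if_pos h0, if_pos h0]
        · rw [if_neg h0, if_neg h0, ih f2 (j + 1) c' (by omega) (by omega)]
      case isFalse => rfl

theorem parEnd_end (s : List Char) (f i : Nat) (cnt : Int) (hi : s.length ≤ i) :
    parEnd s f i cnt = i := by
  cases f with
  | zero => rfl
  | succ f => rw [parEnd, if_neg (by omega)]

theorem parEnd_step (s : List Char) (i : Nat) (cnt : Int) (hi : i < s.length) :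
    parEnd s s.length i cnt =
      (if (if s.getD i ' ' = '(' then cnt + 1 else if s.getD i ' ' = ')' then cnt - 1 else cnt) = 0
       then i + 1
       else parEnd s s.length (i + 1)
         (if s.getD i ' ' = '(' then cnt + 1 else if s.getD i ' ' = ')' then cnt - 1 else cnt)) := by
  obtain ⟨f, hf⟩ : ∃ f, s.length = f + 1 := ⟨s.length - 1, by omega⟩
  conv_lhs => rw [hf]
  rw [parEnd, if_pos hi]
  dsimp only
  generalize (if s.getD i ' ' = '(' then cnt + 1 else if s.getD i ' ' = ')' then cnt - 1 else cnt) = c'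
  by_cases h0 : c' = 0
  · rw [if_pos h0, if_pos h0]
  · rw [if_neg h0, if_neg h0, parEnd_fuel s f s.length (i + 1) c' (by omega) (by omega)]

theorem parEnd_open (s : List Char) (i : Nat) (cnt : Int) (hi : i < s.length)
    (hp : s.getD i ' ' = '(') (hc : cnt + 1 ≠ 0) :
    parEnd s s.length i cnt = parEnd s s.length (i + 1) (cnt + 1) := by
  rw [parEnd_step s i cnt hi, hp]
  simp [hc]

theorem parEnd_close (s : List Char) (i : Nat) (cnt : Int) (hi : i < s.length)
    (hp : s.getD i ' ' = ')') :
    parEnd s s.length i cnt =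
      if cnt - 1 = 0 then i + 1 else parEnd s s.length (i + 1) (cnt - 1) := by
  rw [parEnd_step s i cnt hi, hp]
  simp

theorem parEnd_other (s : List Char) (i : Nat) (cnt : Int) (hi : i < s.length)
    (h1 : s.getD i ' ' ≠ '(') (h2 : s.getD i ' ' ≠ ')') (hc : cnt ≠ 0) :
    parEnd s s.length i cnt = parEnd s s.length (i + 1) cnt := by
  rw [parEnd_step s i cnt hi, if_neg h1, if_neg h2, if_neg hc]

theorem extrLoop_end (s : List Char) (f i : Nat) (e : List String) (hi : s.length ≤ i) :
    extrLoop s f i e = e := by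
  cases f with
  | zero => rfl
  | succ f => rw [extrLoop, if_neg (by omega)]

theorem ws_not_digit (s : List Char) (i : Nat)
    (hws : s.getD i ' ' = ' ' ∨ s.getD i ' ' = '\t' ∨ s.getD i ' ' = '\n') :
    ¬ (s.getD i ' ').isDigit := by
  rcases hws with h | h | h <;> rw [h] <;> decide

theorem ws_not_lparen (s : List Char) (i : Nat)
    (hws : s.getD i ' ' = ' ' ∨ s.getD i ' ' = '\t' ∨ s.getD i ' ' = '\n') :
    s.getD i ' ' ≠ '(' := by
  rcases hws with h | h | h <;> rw [h] <;> decide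

theorem extrLoop_ws (s : List Char) (f i : Nat) (e : List String) (hi : i < s.length)
    (hws : s.getD i ' ' = ' ' ∨ s.getD i ' ' = '\t' ∨ s.getD i ' ' = '\n') :
    extrLoop s (f + 1) i e = extrLoop s f (i + 1) e := by
  rw [extrLoop, if_pos hi, if_pos hws]

theorem extrLoop_digit (s : List Char) (f i : Nat) (e : List String) (hi : i < s.length)
    (hd : (s.getD i ' ').isDigit) :
    extrLoop s (f + 1) i e =
      extrLoop s f (digEnd s s.length i)
        (e ++ [String.ofList ((s.drop i).take (digEnd s s.length i - i))]) := by
  have hws : ¬ (s.getD i ' ' = ' ' ∨ s.getD i ' ' = '\t' ∨ s.getD i ' ' = '\n') := by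
    intro h; exact (ws_not_digit s i h) hd
  rw [extrLoop, if_pos hi, if_neg hws, if_pos hd]

theorem extrLoop_paren (s : List Char) (f i : Nat) (e : List String) (hi : i < s.length)
    (hp : s.getD i ' ' = '(') :
    extrLoop s (f + 1) i e =
      extrLoop s f (parEnd s s.length i 0)
        (e ++ [String.ofList ((s.drop i).take (parEnd s s.length i 0 - i))]) := by
  have hws : ¬ (s.getD i ' ' = ' ' ∨ s.getD i ' ' = '\t' ∨ s.getD i ' ' = '\n') := by
    rw [hp]; decide
  have hd : ¬ (s.getD i ' ').isDigit := by rw [hp]; decide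
  rw [extrLoop, if_pos hi, if_neg hws, if_neg hd, if_pos hp]

theorem extrLoop_other (s : List Char) (f i : Nat) (e : List String) (hi : i < s.length)
    (hws : ¬ (s.getD i ' ' = ' ' ∨ s.getD i ' ' = '\t' ∨ s.getD i ' ' = '\n'))
    (hd : ¬ (s.getD i ' ').isDigit) (hp : s.getD i ' ' ≠ '(') :
    extrLoop s (f + 1) i e = extrLoop s f (i + 1) e := by
  rw [extrLoop, if_pos hi, if_neg hws, if_neg hd, if_neg hp]

theorem stepA_skip (acc : List String) (buf : List Char) (ch : Char)
    (hnd : ¬ ch.isDigit) (hnp : ch ≠ '(') :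
    extrAltStep (acc, buf, 0) ch = (flushAcc acc buf, [], 0) := by
  simp [extrAltStep, hnd, hnp, flushAcc]

theorem stepA_digit (acc : List String) (buf : List Char) (ch : Char) (hd : ch.isDigit) :
    extrAltStep (acc, buf, 0) ch = (acc, buf ++ [ch], 0) := by
  simp [extrAltStep, hd]

theorem stepA_open (acc : List String) (buf : List Char) :
    extrAltStep (acc, buf, 0) '(' = (flushAcc acc buf, ['('], 1) := by
  simp [extrAltStep, flushAcc]

theorem stepP_open (out : List String) (buf : List Char) (d : Nat) (hd : d ≠ 0) :
    extrAltStep (out, buf, d) '(' = (out, buf ++ ['('], d + 1) := by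
  simp [extrAltStep, hd]

theorem stepP_close (out : List String) (buf : List Char) (d : Nat) (hd : d ≠ 0) :
    extrAltStep (out, buf, d) ')' =
      (if d = 1 then (out ++ [String.ofList (buf ++ [')'])], [], 0)
       else (out, buf ++ [')'], d - 1)) := by
  simp [extrAltStep, hd]

theorem stepP_other (out : List String) (buf : List Char) (d : Nat) (ch : Char) (hd : d ≠ 0)
    (h1 : ch ≠ '(') (h2 : ch ≠ ')') :
    extrAltStep (out, buf, d) ch = (out, buf ++ [ch], d) := by
  simp [extrAltStep, hd, h1, h2]

theorem tok_cons' (j i : Nat) (hj : i + 1 ≤ j) (c : Char) (l : List Char) :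
    (c :: l).take (j - i) = c :: l.take (j - (i + 1)) := by
  rw [show j - i = (j - (i + 1)) + 1 by omega, List.take_succ_cons]

theorem tok_cons (s : List Char) (i j : Nat) (hi : i < s.length) (hj : i + 1 ≤ j) :
    (s.drop i).take (j - i) = s.getD i ' ' :: (s.drop (i + 1)).take (j - (i + 1)) := by
  rw [List.drop_eq_getElem_cons hi, List.getD_eq_getElem s ' ' hi,
    show j - i = (j - (i + 1)) + 1 by omega, List.take_succ_cons]

theorem drop_split (s : List Char) (i j : Nat) (hij : i ≤ j) :
    s.drop i = (s.drop i).take (j - i) ++ s.drop j := by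
  conv_lhs => rw [← List.take_append_drop (j - i) (s.drop i)]
  rw [List.drop_drop, show i + (j - i) = j by omega]

theorem foldl_digits (s : List Char) : ∀ (f j : Nat) (acc : List String) (buf : List Char),
    List.foldl extrAltStep (acc, buf, 0) ((s.drop j).take (digEnd s f j - j)) =
      (acc, buf ++ (s.drop j).take (digEnd s f j - j), 0) := by
  intro f
  induction f with
  | zero =>
    intro j acc buf
    simp [digEnd]
  | succ f ih =>
    intro j acc buf
    rw [digEnd]
    split
    case isTrue hc =>
      have hlt : j < s.length := hc.1
      have hj1 : j + 1 ≤ digEnd s f (j + 1) := le_digEnd s f (j + 1)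
      have hg : s.getD j ' ' = s[j] := List.getD_eq_getElem s ' ' hlt
      rw [List.drop_eq_getElem_cons hlt,
        show digEnd s f (j + 1) - j = (digEnd s f (j + 1) - (j + 1)) + 1 by omega,
        List.take_succ_cons, List.foldl_cons, stepA_digit acc buf s[j] (hg ▸ hc.2),
        ih (j + 1) acc (buf ++ [s[j]])]
      simp
    case isFalse hc =>
      simp

theorem extr_main (s : List Char) : ∀ n i, s.length - i ≤ n →
    (∀ (f : Nat) acc buf, s.length - i ≤ f → (buf ≠ [] → ¬ (s.getD i ' ').isDigit) →
      finishSt (List.foldl extrAltStep (acc, buf, 0) (s.drop i)) =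
        extrLoop s f i (flushAcc acc buf))
    ∧ (∀ (f : Nat) out buf (d : Nat), s.length - i ≤ f → buf ≠ [] → 1 ≤ d →
      finishSt (List.foldl extrAltStep (out, buf, d) (s.drop i)) =
        extrLoop s f (parEnd s s.length i (d : Int))
          (out ++ [String.ofList (buf ++ (s.drop i).take (parEnd s s.length i (d : Int) - i))])) := by
  have endCase : ∀ i, s.length ≤ i →
      (∀ (f : Nat) acc buf, s.length - i ≤ f → (buf ≠ [] → ¬ (s.getD i ' ').isDigit) →
        finishSt (List.foldl extrAltStep (acc, buf, 0) (s.drop i)) =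
          extrLoop s f i (flushAcc acc buf))
      ∧ (∀ (f : Nat) out buf (d : Nat), s.length - i ≤ f → buf ≠ [] → 1 ≤ d →
        finishSt (List.foldl extrAltStep (out, buf, d) (s.drop i)) =
          extrLoop s f (parEnd s s.length i (d : Int))
            (out ++ [String.ofList (buf ++ (s.drop i).take (parEnd s s.length i (d : Int) - i))])) := by
    intro i hi
    have hdrop : s.drop i = [] := List.drop_eq_nil_of_le hi
    constructor
    · intro f acc buf _ _
      rw [hdrop, List.foldl_nil, extrLoop_end s f i _ hi]
      rfl
    · intro f out buf d _ hbuf _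
      rw [hdrop, List.foldl_nil, parEnd_end s s.length i _ hi, extrLoop_end s f i _ hi]
      simp [finishSt, flushAcc_ne _ _ hbuf]
  intro n
  induction n with
  | zero => intro i hf; exact endCase i (by omega)
  | succ n ih =>
    intro i hfn
    by_cases hi : i < s.length
    case neg => exact endCase i (by omega)
    case pos =>
    have hdropc : s.drop i = s.getD i ' ' :: s.drop (i + 1) := by
      rw [List.drop_eq_getElem_cons hi, List.getD_eq_getElem s ' ' hi]
    constructor
    · intro f acc buf hff hbuf
      obtain ⟨f', rfl⟩ : ∃ f', f = f' + 1 := ⟨f - 1, by omega⟩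
      by_cases hws : s.getD i ' ' = ' ' ∨ s.getD i ' ' = '\t' ∨ s.getD i ' ' = '\n'
      · rw [hdropc, List.foldl_cons,
          stepA_skip acc buf _ (ws_not_digit s i hws) (ws_not_lparen s i hws),
          (ih (i + 1) (by omega)).1 f' (flushAcc acc buf) [] (by omega) (fun h => absurd rfl h),
          flushAcc_nil, extrLoop_ws s f' i (flushAcc acc buf) hi hws]
      · by_cases hcd : (s.getD i ' ').isDigit
        · have hbe : buf = [] := by
            by_contra hne; exact (hbuf hne) hcd
          subst hbe
          have hij : i < digEnd s s.length i := lt_digEnd s i hi hcd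
          have hjlen : digEnd s s.length i ≤ s.length := digEnd_le_length s s.length i (by omega)
          rw [drop_split s i (digEnd s s.length i) (by omega), List.foldl_append,
            foldl_digits s s.length i acc [], List.nil_append]
          have hrun : (s.drop i).take (digEnd s s.length i - i) ≠ [] := by
            apply List.ne_nil_of_length_pos
            rw [List.length_take, List.length_drop]
            omega
          have hnd : (s.drop i).take (digEnd s s.length i - i) ≠ [] →
              ¬ (s.getD (digEnd s s.length i) ' ').isDigit := by
            intro _
            by_cases hjl : digEnd s s.length i < s.length
            · exact digEnd_not_digit s s.length i (by omega) hjl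
            · rw [List.getD_eq_getElem?_getD, List.getElem?_eq_none (by omega)]
              decide
          rw [(ih (digEnd s s.length i) (by omega)).1 f' acc _ (by omega) hnd,
            flushAcc_ne acc _ hrun, flushAcc_nil,
            extrLoop_digit s f' i acc hi hcd]
        · by_cases hcp : s.getD i ' ' = '('
          · rw [hdropc, List.foldl_cons, hcp, stepA_open acc buf]
            have hP := (ih (i + 1) (by omega)).2 f' (flushAcc acc buf) ['('] 1
              (by omega) (by simp) (le_refl 1)
            rw [Nat.cast_one] at hP
            rw [hP, extrLoop_paren s f' i (flushAcc acc buf) hi hcp,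
              parEnd_open s i 0 hi hcp (by norm_num), zero_add,
              tok_cons s i (parEnd s s.length (i + 1) 1) hi (le_parEnd s s.length (i + 1) 1), hcp]
            rfl
          · rw [hdropc, List.foldl_cons, stepA_skip acc buf _ hcd hcp,
              (ih (i + 1) (by omega)).1 f' (flushAcc acc buf) [] (by omega) (fun h => absurd rfl h),
              flushAcc_nil, extrLoop_other s f' i (flushAcc acc buf) hi hws hcd hcp]
    · intro f out buf d hff hbuf hd1
      have hdne : d ≠ 0 := by omega
      by_cases hcp : s.getD i ' ' = '('
      · have hP := (ih (i + 1) (by omega)).2 f out (buf ++ ['(']) (d + 1)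
          (by omega) (by simp) (by omega)
        rw [show ((d + 1 : Nat) : Int) = (d : Int) + 1 by push_cast; ring] at hP
        rw [hdropc, List.foldl_cons, hcp, stepP_open out buf d hdne, hP,
          parEnd_open s i (d : Int) hi hcp (by omega),
          tok_cons' (parEnd s s.length (i + 1) ((d : Int) + 1)) i
            (le_parEnd s s.length (i + 1) _) '(' _]
        simp
      · by_cases hcq : s.getD i ' ' = ')'
        · by_cases hd1' : d = 1
          · subst hd1'
            rw [hdropc, List.foldl_cons, hcq, stepP_close out buf 1 hdne, if_pos rfl,
              (ih (i + 1) (by omega)).1 f (out ++ [String.ofList (buf ++ [')'])]) []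
                (by omega) (fun h => absurd rfl h),
              flushAcc_nil, Nat.cast_one,
              parEnd_close s i 1 hi hcq, if_pos (by norm_num),
              tok_cons' (i + 1) i (le_refl (i + 1)) ')' _]
            simp
          · have hd2 : 2 ≤ d := by omega
            have hP := (ih (i + 1) (by omega)).2 f out (buf ++ [')']) (d - 1)
              (by omega) (by simp) (by omega)
            rw [show ((d - 1 : Nat) : Int) = (d : Int) - 1 by omega] at hP
            rw [hdropc, List.foldl_cons, hcq, stepP_close out buf d hdne, if_neg hd1', hP,
              parEnd_close s i (d : Int) hi hcq, if_neg (by omega),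
              tok_cons' (parEnd s s.length (i + 1) ((d : Int) - 1)) i
                (le_parEnd s s.length (i + 1) _) ')' _]
            simp
        · have hP := (ih (i + 1) (by omega)).2 f out (buf ++ [s.getD i ' ']) d
            (by omega) (by simp) hd1
          rw [hdropc, List.foldl_cons, stepP_other out buf d _ hdne hcp hcq, hP,
            parEnd_other s i (d : Int) hi hcp hcq (by omega),
            tok_cons' (parEnd s s.length (i + 1) (d : Int)) i
              (le_parEnd s s.length (i + 1) _) (s.getD i ' ') _]
          simp

-- ===== VERDICT (by name: the statement is the Claim_ definition above) =====
theorem extr_spec : Claim_equal_extr := by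
  intro input_str _
  unfold Spec_extr
  have h := (extr_main input_str.toList input_str.toList.length 0 (by omega)).1
    input_str.toList.length [] [] (by omega) (fun hne => absurd rfl hne)
  rw [List.drop_zero, flushAcc_nil] at h
  show extr input_str = extr_alt input_str
  rw [extr, extr_alt, ← h]
  rfl
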